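-- pv_equiv track=rewrite | github.com/Jdweagly/484Fall2021 | updatedCode/CharacterCreator.py | constitution_mod
-- ===== SOURCE A (Python) =====
-- Ability_Score_Modifiers = {'1': '-5', '2': '-4', '3': '-4', '4': '-3', '5': '-3', '6': '-2', '7': '-2', '8': '-1',
--                            '9': '-1', '10': '0', '11': '0', '12': '+1', '13': '+1', '14': '+2', '15': '+2', '16': '+3',
--                            '17': '+3', '18': '+4', '19': '+4', '20': '+5', '21': '+5', '22': '+6'}
--
-- def constitution_mod(s_r, con_r):
--     # RaceBonuses
--
--     if s_r == 'Half-Orc':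
--         con_bonus = 1
--         constitution = str(int(con_r) + int(con_bonus))
--     elif s_r == 'Human':
--         con_bonus = 1
--         constitution = str(int(con_r) + int(con_bonus))
--     else:
--         constitution = con_r
--
--     # Modifier Code
--
--     for key in Ability_Score_Modifiers:
--         if key == constitution:
--             return Ability_Score_Modifiers[constitution]
--         else:
--             pass
-- ===== SOURCE B (Python) =====
-- Ability_Score_Modifiers = {'1': '-5', '2': '-4', '3': '-4', '4': '-3', '5': '-3', '6': '-2', '7': '-2', '8': '-1',
--                            '9': '-1', '10': '0', '11': '0', '12': '+1', '13': '+1', '14': '+2', '15': '+2', '16': '+3',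
--                            '17': '+3', '18': '+4', '19': '+4', '20': '+5', '21': '+5', '22': '+6'}
--
--
-- def constitution_mod(s_r, con_r):
--     # Race bonus: Half-Orc and Human get +1 constitution
--     if s_r == 'Half-Orc' or s_r == 'Human':
--         constitution = str(int(con_r) + 1)
--     else:
--         constitution = con_r
--     # Valid key domain is the table's keys; outside it the answer is None
--     if constitution not in Ability_Score_Modifiers:
--         return None
--     # Standard D&D modifier formula instead of a table scan
--     m = (int(constitution) - 10) // 2
--     if m > 0:
--         return '+' + str(m)
--     if m == 0:
--         return '0'
--     return str(m)
-- ===== Notes on version B (the rewrite author's own statement) =====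
-- stated objective: idiomatic
-- what changed: B replaces A's linear for-loop scan over the 22-entry modifier table by a membership guard plus the closed-form D&D formula m = (int(constitution) - 10) // 2 with standard sign formatting.
import Mathlib
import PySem

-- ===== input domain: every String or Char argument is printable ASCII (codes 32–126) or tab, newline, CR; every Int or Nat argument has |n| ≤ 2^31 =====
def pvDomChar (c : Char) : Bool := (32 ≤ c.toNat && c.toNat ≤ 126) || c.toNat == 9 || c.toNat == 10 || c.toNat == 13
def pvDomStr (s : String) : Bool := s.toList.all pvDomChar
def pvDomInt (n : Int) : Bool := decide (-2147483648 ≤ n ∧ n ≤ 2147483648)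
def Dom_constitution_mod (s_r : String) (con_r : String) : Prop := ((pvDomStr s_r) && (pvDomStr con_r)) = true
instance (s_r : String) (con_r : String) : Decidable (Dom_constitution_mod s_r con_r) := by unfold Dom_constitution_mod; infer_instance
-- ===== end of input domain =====

-- B replaces A's linear scan of the modifier table by the closed-form D&D formula (int(c) - 10) // 2 behind a key-membership guard (objective: idiomatic; equivalence is about the return value only).

-- ===== PORT A =====
def abilityScoreModifiers : PySem.Dict String String := PySem.Dict.ofList
  [("1", "-5"), ("2", "-4"), ("3", "-4"), ("4", "-3"), ("5", "-3"), ("6", "-2"), ("7", "-2"), ("8", "-1"),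
   ("9", "-1"), ("10", "0"), ("11", "0"), ("12", "+1"), ("13", "+1"), ("14", "+2"), ("15", "+2"), ("16", "+3"),
   ("17", "+3"), ("18", "+4"), ("19", "+4"), ("20", "+5"), ("21", "+5"), ("22", "+6")]

-- 'for key in Ability_Score_Modifiers: if key == constitution: return Ability_Score_Modifiers[constitution]'
def modScanA (keys : List String) (constitution : String) : Option String :=
  match keys with
  | [] => none
  | k :: rest =>
    if k == constitution then abilityScoreModifiers.get? constitution
    else modScanA rest constitution

def constitution_mod (s_r : String) (con_r : String) : Option String :=
  if s_r == "Half-Orc" then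
    match PySem.Int.ofStr? con_r with   -- int(con_r) raises ValueError on none: excluded by Pre_
    | none => none
    | some n => modScanA abilityScoreModifiers.keys (PySem.Int.toStr (n + 1))
  else if s_r == "Human" then
    match PySem.Int.ofStr? con_r with
    | none => none
    | some n => modScanA abilityScoreModifiers.keys (PySem.Int.toStr (n + 1))
  else
    modScanA abilityScoreModifiers.keys con_r

-- ===== PORT B =====
def modFormulaB (constitution : String) : Option String :=
  if !(abilityScoreModifiers.contains constitution) then none
  else
    let m := PySem.Int.floordiv ((PySem.Int.ofStr? constitution).getD 0 - 10) 2
    -- int(constitution) cannot raise here: constitution is a table key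
    if m > 0 then some ("+" ++ PySem.Int.toStr m)
    else if m = 0 then some "0"
    else some (PySem.Int.toStr m)

def constitution_mod_alt (s_r : String) (con_r : String) : Option String :=
  if s_r == "Half-Orc" || s_r == "Human" then
    match PySem.Int.ofStr? con_r with   -- int(con_r) raises ValueError on none: excluded by Pre_
    | none => none
    | some n => modFormulaB (PySem.Int.toStr (n + 1))
  else
    modFormulaB con_r

-- ===== PRECONDITION & SPEC =====
-- Pre_ excludes exactly the inputs where A raises ValueError: race 'Half-Orc' or 'Human' with a con_r that int() cannot parse.
def Pre_constitution_mod (s_r : String) (con_r : String) : Prop :=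
  (s_r = "Half-Orc" ∨ s_r = "Human") → (PySem.Int.ofStr? con_r).isSome = true
instance (s_r : String) (con_r : String) : Decidable (Pre_constitution_mod s_r con_r) := by unfold Pre_constitution_mod; infer_instance
def pvWitness_constitution_mod : String × String := ("Elf", "14")

def Spec_constitution_mod (s_r : String) (con_r : String) (out : Option String) : Prop := out = constitution_mod_alt s_r con_r
instance (s_r : String) (con_r : String) (out : Option String) : Decidable (Spec_constitution_mod s_r con_r out) := by unfold Spec_constitution_mod; infer_instance

-- ===== CLAIM (what is proved, stated in full; the proofs are below) =====
def Claim_equal_constitution_mod : Prop := ∀ (s_r : String) (con_r : String), Dom_constitution_mod s_r con_r → Pre_constitution_mod s_r con_r → Spec_constitution_mod s_r con_r (constitution_mod s_r con_r)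

-- ===== LEMMAS AND PROOFS =====

-- the two tails agree on every constitution string
theorem scan_eq_formula (c : String) : modScanA abilityScoreModifiers.keys c = modFormulaB c := by
  by_cases h : abilityScoreModifiers.contains c = true
  · -- c is one of the 22 literal keys: check each
    have hmem : c ∈ abilityScoreModifiers.keys := (PySem.Dict.contains_iff_mem_keys _ _).mp h
    have hk : abilityScoreModifiers.keys = ["1", "2", "3", "4", "5", "6", "7", "8", "9", "10",
        "11", "12", "13", "14", "15", "16", "17", "18", "19", "20", "21", "22"] := by decide
    rw [hk] at hmem
    fin_cases hmem <;> decide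
  · -- c is no key: both sides are none
    simp only [Bool.not_eq_true] at h
    have hscan : ∀ ks : List String, (∀ k ∈ ks, (k == c) = false) →
        modScanA ks c = none := by
      intro ks hks
      induction ks with
      | nil => rfl
      | cons k rest ih =>
        simp only [modScanA, hks k (by simp)]
        exact ih (fun k' hk' => hks k' (by simp [hk']))
    have hkeys : ∀ k ∈ abilityScoreModifiers.keys, (k == c) = false := by
      intro k hk
      by_contra hc
      simp only [Bool.not_eq_false, beq_iff_eq] at hc
      subst hc
      have := PySem.Dict.contains_iff_mem_keys (d := abilityScoreModifiers) (k := k)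
      simp_all
    rw [hscan _ hkeys, modFormulaB, h]
    simp

-- ===== VERDICT (by name: the statement is the Claim_ definition above) =====
theorem constitution_mod_spec : Claim_equal_constitution_mod := by
  intro s_r con_r _ hpre
  unfold Spec_constitution_mod constitution_mod constitution_mod_alt
  by_cases h1 : s_r = "Half-Orc"
  · subst h1
    have := hpre (Or.inl rfl)
    cases hp : PySem.Int.ofStr? con_r with
    | none => simp [hp] at this
    | some n => simp [scan_eq_formula]
  · by_cases h2 : s_r = "Human"
    · subst h2
      have := hpre (Or.inr rfl)
      cases hp : PySem.Int.ofStr? con_r with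
      | none => simp [hp] at this
      | some n => simp [scan_eq_formula]
    · simp [h1, h2, scan_eq_formula]
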